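-- pv_equiv track=rewrite | github.com/kaiserto/k720_libs | k720_pylib/k720.py | _create_packet
-- ===== SOURCE A (Python) =====
-- STX = 0x02
--
-- ETX = 0x03
--
-- def _calculate_bcc(packet):
--     # type: (list) -> int
--     xorsum = 0x00
--     for b in packet:
--         xorsum ^= b
--     return xorsum
--
-- def _create_packet(mac_addr, data):
--     # type: (int, str) -> list | None
--     packet = []
--     selen = len(data)
--     if mac_addr < 0 or mac_addr > 15:
--         return None
--     if selen == 0:
--         return None
--
--     # start
--     packet.append(STX)
--
--     # address
--     addr_h = ord('0') + mac_addr // 10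
--     addr_l = ord('0') + mac_addr % 10
--     packet.append(addr_h)
--     packet.append(addr_l)
--
--     # selen
--     selen_l = selen & 0xff
--     selen_h = (selen << 8) & 0xff
--     packet.append(selen_h)
--     packet.append(selen_l)
--     # data
--     for d in data:
--         packet.append(ord(d))
--
--     # end
--     packet.append(ETX)
--
--     # bcc
--     bcc = _calculate_bcc(packet)
--     packet.append(bcc)
--
--     return packet
-- ===== SOURCE B (Python) =====
-- STX = 0x02
-- ETX = 0x03
--
-- def _create_packet(mac_addr, data):
--     # type: (int, str) -> list | None
--     if mac_addr < 0 or mac_addr > 15: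
--         return None
--     if not data:
--         return None
--     selen = len(data)
--     packet = []
--     bcc = 0
--     # single pass: append each byte and fold it into the BCC at the same time
--     for b in (STX,
--               ord('0') + mac_addr // 10,
--               ord('0') + mac_addr % 10,
--               (selen << 8) & 0xff,
--               selen & 0xff):
--         packet.append(b)
--         bcc ^= b
--     for d in data:
--         packet.append(ord(d))
--         bcc ^= ord(d)
--     packet.append(ETX)
--     bcc ^= ETX
--     packet.append(bcc)
--     return packet
-- ===== Notes on version B (the rewrite author's own statement) =====
-- stated objective: alternative
-- what changed: B computes the BCC with a running XOR accumulator updated as each byte is appended in a single pass, instead of building the packet first and re-scanning it with a separate checksum helper.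
import Mathlib
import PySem

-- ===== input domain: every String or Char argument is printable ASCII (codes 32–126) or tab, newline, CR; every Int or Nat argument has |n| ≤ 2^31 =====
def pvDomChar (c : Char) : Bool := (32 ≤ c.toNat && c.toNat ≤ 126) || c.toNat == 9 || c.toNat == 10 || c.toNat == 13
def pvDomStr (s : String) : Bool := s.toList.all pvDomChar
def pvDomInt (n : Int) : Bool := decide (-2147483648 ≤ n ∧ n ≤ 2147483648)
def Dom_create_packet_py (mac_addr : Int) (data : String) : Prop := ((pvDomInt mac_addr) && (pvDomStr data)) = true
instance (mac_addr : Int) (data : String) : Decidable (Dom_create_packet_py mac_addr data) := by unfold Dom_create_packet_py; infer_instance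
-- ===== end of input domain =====

-- ===== PORT A =====
-- B builds the packet and a running XOR checksum in one pass instead of a second scan (alternative decomposition).
-- _calculate_bcc: XOR-fold over the packet
def calculate_bcc_py (packet : List Int) : Int :=
  packet.foldl (fun xorsum b => PySem.Int.bxor xorsum b) 0

def create_packet_py (mac_addr : Int) (data : String) : Option (List Int) :=
  let selen : Int := PySem.Str.len data
  if mac_addr < 0 ∨ mac_addr > 15 then none
  else if selen = 0 then none
  else
    let packet : List Int := [2]                                   -- STX
    let addr_h : Int := 48 + PySem.Int.floordiv mac_addr 10        -- ord '0' = 48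
    let addr_l : Int := 48 + PySem.Int.mod mac_addr 10
    let packet := packet ++ [addr_h, addr_l]
    let selen_l : Int := PySem.Int.band selen 255
    let selen_h : Int := PySem.Int.band (selen <<< (8 : Nat)) 255
    let packet := packet ++ [selen_h, selen_l]
    let packet := data.toList.foldl (fun p d => p ++ [(d.toNat : Int)]) packet
    let packet := packet ++ [3]                                    -- ETX
    let bcc := calculate_bcc_py packet
    some (packet ++ [bcc])

-- ===== PORT B =====
def create_packet_py_alt (mac_addr : Int) (data : String) : Option (List Int) :=
  if mac_addr < 0 ∨ mac_addr > 15 then none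
  else if data.toList = [] then none                               -- "if not data"
  else
    let selen : Int := PySem.Str.len data
    let header : List Int :=
      [2, 48 + PySem.Int.floordiv mac_addr 10, 48 + PySem.Int.mod mac_addr 10,
       PySem.Int.band (selen <<< (8 : Nat)) 255, PySem.Int.band selen 255]
    -- append each byte and xor it into the accumulator at the same time
    let st := header.foldl
      (fun (s : List Int × Int) b => (s.1 ++ [b], PySem.Int.bxor s.2 b)) ([], 0)
    let st := data.toList.foldl
      (fun (s : List Int × Int) d => (s.1 ++ [(d.toNat : Int)], PySem.Int.bxor s.2 (d.toNat : Int))) st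
    let packet := st.1 ++ [3]
    let bcc := PySem.Int.bxor st.2 3
    some (packet ++ [bcc])

-- ===== PRECONDITION & SPEC =====
def Spec_create_packet_py (mac_addr : Int) (data : String) (out : Option (List Int)) : Prop := out = create_packet_py_alt mac_addr data
instance (mac_addr : Int) (data : String) (out : Option (List Int)) : Decidable (Spec_create_packet_py mac_addr data out) := by unfold Spec_create_packet_py; infer_instance

-- ===== CLAIM (what is proved, stated in full; the proofs are below) =====
def Claim_equal_create_packet_py : Prop := ∀ (mac_addr : Int) (data : String), Dom_create_packet_py mac_addr data → Spec_create_packet_py mac_addr data (create_packet_py mac_addr data)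

-- ===== LEMMAS AND PROOFS =====
-- A's data loop is plain append
theorem fold_append_eq (l : List Char) (p : List Int) :
    l.foldl (fun (q : List Int) d => q ++ [(d.toNat : Int)]) p
      = p ++ l.map (fun d => (d.toNat : Int)) := by
  induction l generalizing p with
  | nil => simp
  | cons h t ih => simp [List.foldl, ih]

-- B's char-by-char paired fold
theorem fold_pair_char_eq (l : List Char) (p : List Int) (x : Int) :
    l.foldl (fun (s : List Int × Int) d => (s.1 ++ [(d.toNat : Int)], PySem.Int.bxor s.2 (d.toNat : Int))) (p, x)
      = (p ++ l.map (fun d => (d.toNat : Int)),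
         (l.map (fun d => (d.toNat : Int))).foldl (fun a b => PySem.Int.bxor a b) x) := by
  induction l generalizing p x with
  | nil => simp
  | cons h t ih => simp [List.foldl, ih]

theorem flatten_map_singleton (l : List Char) :
    (l.map (fun d => [((d.toNat : Int))])).flatten = l.map (fun d => ((d.toNat : Int))) := by
  induction l with
  | nil => simp
  | cons h t ih => simp [ih]

-- ===== VERDICT (by name: the statement is the Claim_ definition above) =====
theorem create_packet_py_spec : Claim_equal_create_packet_py := by
  intro mac_addr data _
  unfold Spec_create_packet_py create_packet_py create_packet_py_alt
  have hlen : PySem.Str.len data = (data.toList.length : Int) := PySem.Str.len_eq data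
  by_cases hg : mac_addr < 0 ∨ mac_addr > 15
  · simp [hg]
  · by_cases hz : data.toList = []
    · simp [hg, hz]
    · have hz' : ¬ (PySem.Str.len data = 0) := by
        rw [hlen]; intro h; exact hz (List.length_eq_zero_iff.mp (by exact_mod_cast h))
      simp only [hg, hz, hz', ite_false, ite_true]
      simp [calculate_bcc_py, fold_pair_char_eq, fold_append_eq,
            List.foldl_append, List.foldl, flatten_map_singleton]
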